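-- pv_equiv track=rewrite | github.com/AClon314/mocap-wrapper | docker/lib.py | invert_ranges
-- ===== SOURCE A (Python) =====
-- from typing import Any, Iterable, Literal, Sequence, TypeVar
--
-- def invert_ranges(ranges: Sequence[tuple], total_range: tuple) -> list[tuple]:
--     """
--     Invert the given ranges within the total_range.
--
--     Args:
--         ranges: A sequence of ranges to be inverted.
--         total_range: The total range within which the inversion is performed.
--
--     Returns:
--         list(tuple): The inverted ranges.
--     """
--     total_start, total_end = total_range
--     valid_ranges = []
--     # Truncate ranges to fit within total_range and collect valid ones
--     for r in ranges:
--         start = max(r[0], total_start)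
--         end = min(r[1], total_end)
--         if start < end:
--             valid_ranges.append((start, end))
--
--     # Merge overlapping or adjacent ranges
--     if not valid_ranges:
--         return [(total_start, total_end)] if total_start < total_end else []
--
--     sorted_ranges = sorted(valid_ranges, key=lambda x: x[0])
--     merged = [sorted_ranges[0]]
--     for current in sorted_ranges[1:]:
--         last = merged[-1]
--         if current[0] <= last[1]:
--             merged[-1] = (last[0], max(last[1], current[1]))
--         else:
--             merged.append(current)
--
--     # Generate inverted ranges
--     inverted = []
--     prev_end = total_start
--     for interval in merged:
--         current_start = interval[0]
--         if prev_end < current_start: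
--             inverted.append((prev_end, current_start))
--         prev_end = max(prev_end, interval[1])
--     if prev_end < total_end:
--         inverted.append((prev_end, total_end))
--
--     return inverted
-- ===== SOURCE B (Python) =====
-- def invert_ranges(ranges, total_range):
--     """Complement of `ranges` within `total_range`, without an explicit merge pass:
--     truncate, sort by start, then one sweep emitting each uncovered gap directly."""
--     total_start, total_end = total_range
--     valid = sorted(
--         ((max(r[0], total_start), min(r[1], total_end))
--          for r in ranges
--          if max(r[0], total_start) < min(r[1], total_end)),
--         key=lambda x: x[0],
--     )
--     inverted = []
--     prev = total_start
--     for start, end in valid: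
--         if prev < start:
--             inverted.append((prev, start))
--         prev = max(prev, end)
--     if prev < total_end:
--         inverted.append((prev, total_end))
--     return inverted
-- ===== Notes on version B (the rewrite author's own statement) =====
-- stated objective: simpler
-- what changed: B drops A's explicit merge pass entirely: it truncates via a comprehension, sorts by start, and emits the complement gaps in a single sweep whose running prev-end makes merging (and the separate empty-input case) unnecessary.
import Mathlib
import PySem

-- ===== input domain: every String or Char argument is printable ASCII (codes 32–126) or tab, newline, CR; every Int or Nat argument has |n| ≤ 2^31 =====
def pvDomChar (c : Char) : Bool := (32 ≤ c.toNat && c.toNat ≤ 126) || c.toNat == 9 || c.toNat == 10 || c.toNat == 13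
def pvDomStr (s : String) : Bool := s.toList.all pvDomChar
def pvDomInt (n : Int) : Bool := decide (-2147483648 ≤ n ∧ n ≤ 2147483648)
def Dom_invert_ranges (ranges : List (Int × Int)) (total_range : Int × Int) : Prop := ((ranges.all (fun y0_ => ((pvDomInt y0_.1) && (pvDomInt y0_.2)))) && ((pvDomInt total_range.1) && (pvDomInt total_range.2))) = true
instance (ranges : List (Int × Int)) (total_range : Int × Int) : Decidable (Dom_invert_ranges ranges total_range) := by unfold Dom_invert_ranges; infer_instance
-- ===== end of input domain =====

-- B drops A's explicit merge pass: one sorted sweep with a running prev-end emits the gaps directly (simpler; same cost).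

-- ===== PORT A =====
def invert_ranges (ranges : List (Int × Int)) (total_range : Int × Int) : List (Int × Int) :=
  let total_start := total_range.1
  let total_end := total_range.2
  let valid_ranges := ranges.foldl (fun acc r =>
    let start := max r.1 total_start
    let «end» := min r.2 total_end
    if start < «end» then acc ++ [(start, «end»)] else acc) []
  if valid_ranges = [] then
    (if total_start < total_end then [(total_start, total_end)] else [])
  else
    match PySem.List.sorted valid_ranges (fun x => x.1) false with
    | [] => []  -- unreachable: sorted of the nonempty valid_ranges is nonempty
    | first :: rest =>
      let merged := rest.foldl (fun m cur =>
        let last := m.getLastD (0, 0)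
        if cur.1 ≤ last.2 then m.dropLast ++ [(last.1, max last.2 cur.2)]
        else m ++ [cur]) [first]
      let st := merged.foldl (fun (s : List (Int × Int) × Int) interval =>
        (if s.2 < interval.1 then s.1 ++ [(s.2, interval.1)] else s.1, max s.2 interval.2))
        ([], total_start)
      if st.2 < total_end then st.1 ++ [(st.2, total_end)] else st.1

-- ===== PORT B =====
def invert_ranges_alt (ranges : List (Int × Int)) (total_range : Int × Int) : List (Int × Int) :=
  let total_start := total_range.1
  let total_end := total_range.2
  let valid := PySem.List.sorted
    (ranges.filterMap (fun r =>
      let s := max r.1 total_start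
      let e := min r.2 total_end
      if s < e then some (s, e) else none))
    (fun x => x.1) false
  let st := valid.foldl (fun (s : List (Int × Int) × Int) x =>
      (if s.2 < x.1 then s.1 ++ [(s.2, x.1)] else s.1, max s.2 x.2)) ([], total_start)
  if st.2 < total_end then st.1 ++ [(st.2, total_end)] else st.1

-- ===== PRECONDITION & SPEC =====
def Spec_invert_ranges (ranges : List (Int × Int)) (total_range : Int × Int) (out : List (Int × Int)) : Prop := out = invert_ranges_alt ranges total_range
instance (ranges : List (Int × Int)) (total_range : Int × Int) (out : List (Int × Int)) : Decidable (Spec_invert_ranges ranges total_range out) := by unfold Spec_invert_ranges; infer_instance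

-- ===== CLAIM (what is proved, stated in full; the proofs are below) =====
def Claim_equal_invert_ranges : Prop := ∀ (ranges : List (Int × Int)) (total_range : Int × Int), Dom_invert_ranges ranges total_range → Spec_invert_ranges ranges total_range (invert_ranges ranges total_range)

-- ===== LEMMAS AND PROOFS =====

-- A's truncation foldl builds exactly B's filterMap.
theorem pv_valid_eq (ts te : Int) (l : List (Int × Int)) (acc : List (Int × Int)) :
    l.foldl (fun acc r =>
      let start := max r.1 ts
      let «end» := min r.2 te
      if start < «end» then acc ++ [(start, «end»)] else acc) acc
    = acc ++ l.filterMap (fun r =>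
      let s := max r.1 ts
      let e := min r.2 te
      if s < e then some (s, e) else none) := by
  induction l generalizing acc with
  | nil => simp
  | cons h t ih =>
    simp only [List.foldl_cons, List.filterMap_cons]
    rw [ih]
    by_cases hc : max h.1 ts < min h.2 te
    · simp [hc]
    · simp [hc]

-- recursive form of A's merge loop (proof helper only)
def pvMergeRec (last : Int × Int) : List (Int × Int) → List (Int × Int)
  | [] => [last]
  | c :: t => if c.1 ≤ last.2 then pvMergeRec (last.1, max last.2 c.2) t else last :: pvMergeRec c t

theorem pv_merge_foldl (rest : List (Int × Int)) (pre : List (Int × Int)) (last : Int × Int) :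
    rest.foldl (fun m cur =>
      let l := m.getLastD (0, 0)
      if cur.1 ≤ l.2 then m.dropLast ++ [(l.1, max l.2 cur.2)] else m ++ [cur]) (pre ++ [last])
    = pre ++ pvMergeRec last rest := by
  induction rest generalizing pre last with
  | nil => simp [pvMergeRec]
  | cons c t ih =>
    simp only [List.foldl_cons, List.getLastD_concat, List.dropLast_concat, pvMergeRec]
    by_cases hc : c.1 ≤ last.2
    · simpa [hc] using ih pre (last.1, max last.2 c.2)
    · have := ih (pre ++ [last]) c
      simp only [List.append_assoc] at this
      simpa [hc] using this

-- the gap sweep cannot see the merge: merging produces the same fold result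
theorem pv_gaps_merge (rest : List (Int × Int)) (last : Int × Int) (inv : List (Int × Int)) (p : Int) :
    (pvMergeRec last rest).foldl (fun (s : List (Int × Int) × Int) x =>
        (if s.2 < x.1 then s.1 ++ [(s.2, x.1)] else s.1, max s.2 x.2)) (inv, p)
    = (last :: rest).foldl (fun (s : List (Int × Int) × Int) x =>
        (if s.2 < x.1 then s.1 ++ [(s.2, x.1)] else s.1, max s.2 x.2)) (inv, p) := by
  induction rest generalizing last inv p with
  | nil => rfl
  | cons c t ih =>
    by_cases hc : c.1 ≤ last.2
    · have hnc : ¬ max p last.2 < c.1 := by omega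
      simp only [pvMergeRec, if_pos hc]
      rw [ih]
      simp only [List.foldl_cons, if_neg hnc]
      have : max (max p last.2) c.2 = max p (max last.2 c.2) := by omega
      rw [this]
    · simp only [pvMergeRec, if_neg hc, List.foldl_cons]
      rw [ih]
      rfl

-- ===== VERDICT (by name: the statement is the Claim_ definition above) =====
theorem invert_ranges_spec : Claim_equal_invert_ranges := by
  intro ranges total_range _
  unfold Spec_invert_ranges invert_ranges invert_ranges_alt
  simp only [pv_valid_eq total_range.1 total_range.2 ranges [], List.nil_append]
  set f := fun r : Int × Int =>
      let s := max r.1 total_range.1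
      let e := min r.2 total_range.2
      if s < e then some (s, e) else none with hf
  by_cases hv : ranges.filterMap f = []
  · rw [if_pos hv, hv]
    simp [PySem.List.sorted]
  · rw [if_neg hv]
    have hs : PySem.List.sorted (ranges.filterMap f) (fun x => x.1) false ≠ [] := by
      simpa [PySem.List.sorted_eq_nil_iff] using hv
    rcases hsort : PySem.List.sorted (ranges.filterMap f) (fun x => x.1) false with _ | ⟨first, rest⟩
    · exact absurd hsort hs
    · simp only
      rw [show [first] = ([] : List (Int × Int)) ++ [first] by simp, pv_merge_foldl rest [] first,
        List.nil_append, pv_gaps_merge rest first [] total_range.1]
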